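-- pv_equiv track=rewrite | github.com/guozigezi/ship-detect | detect.py | _collect_scales
-- ===== SOURCE A (Python) =====
-- def _collect_scales(primary_size, multiscale, extra_scales):
--     """Return the set of inference scales to run."""
--     scales = []
--     if primary_size:
--         scales.append(int(primary_size))
--     if multiscale and extra_scales:
--         for scale in extra_scales:
--             if scale is None:
--                 continue
--             scale = int(scale)
--             if scale not in scales:
--                 scales.append(scale)
--     return scales or [960]
-- ===== SOURCE B (Python) =====
-- def _collect_scales(primary_size, multiscale, extra_scales):
--     """Return the set of inference scales to run."""
--     pending = []
--     if primary_size: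
--         pending.append(int(primary_size))
--     if multiscale and extra_scales:
--         pending.extend(int(s) for s in extra_scales if s is not None)
--     scales = []
--     while pending:
--         head = pending[0]
--         scales.append(head)
--         pending = [c for c in pending[1:] if c != head]
--     return scales or [960]
-- ===== Notes on version B (the rewrite author's own statement) =====
-- stated objective: alternative
-- what changed: B deduplicates by repeatedly taking the head of the remaining candidate list and filtering every later duplicate of it out of that remaining input, instead of A's scan that tests each element for membership in the output built so far.
import Mathlib
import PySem

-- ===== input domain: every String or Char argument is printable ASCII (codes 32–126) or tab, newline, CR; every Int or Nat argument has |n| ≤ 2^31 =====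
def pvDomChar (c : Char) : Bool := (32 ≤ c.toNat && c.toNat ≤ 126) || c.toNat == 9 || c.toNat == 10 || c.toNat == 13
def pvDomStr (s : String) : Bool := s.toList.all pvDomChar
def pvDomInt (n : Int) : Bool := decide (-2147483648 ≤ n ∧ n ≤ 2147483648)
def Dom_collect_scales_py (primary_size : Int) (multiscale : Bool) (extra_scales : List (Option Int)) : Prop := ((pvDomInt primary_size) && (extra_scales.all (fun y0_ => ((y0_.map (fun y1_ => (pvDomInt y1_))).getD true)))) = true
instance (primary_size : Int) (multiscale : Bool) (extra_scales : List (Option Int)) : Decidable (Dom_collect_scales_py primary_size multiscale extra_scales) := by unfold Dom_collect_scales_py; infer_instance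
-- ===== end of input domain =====

-- B replaces A's membership-test-against-output dedup scan by head-then-filter-the-rest dedup (objective: alternative).

-- ===== PORT A =====
-- Port of A: interleaved loop with an in-loop 'not in' membership branch against the output.
def collect_scales_py (primary_size : Int) (multiscale : Bool) (extra_scales : List (Option Int)) : List Int :=
  let scales : List Int := if primary_size ≠ 0 then [primary_size] else []
  let scales : List Int :=
    if multiscale && !extra_scales.isEmpty then
      extra_scales.foldl (fun acc sc =>
        match sc with
        | none => acc
        | some s => if s ∈ acc then acc else acc ++ [s]) scales
    else scales
  if scales = [] then [960] else scales

-- ===== PORT B =====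
-- B's while loop: take the head of the remaining candidates, filter its duplicates out of the rest.
def pvFdedup : List Int → List Int
  | [] => []
  | x :: rest => x :: pvFdedup (rest.filter (fun c => c ≠ x))
termination_by xs => xs.length
decreasing_by
  simp only [List.length_unattach, List.length_cons]
  exact Nat.lt_succ_of_le ((List.length_filter_le _ _).trans (le_of_eq List.length_attach))

def collect_scales_py_alt (primary_size : Int) (multiscale : Bool) (extra_scales : List (Option Int)) : List Int :=
  let pending : List Int :=
    (if primary_size ≠ 0 then [primary_size] else []) ++
      (if multiscale && !extra_scales.isEmpty then extra_scales.filterMap id else [])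
  let scales := pvFdedup pending
  if scales = [] then [960] else scales

-- ===== PRECONDITION & SPEC =====
def Spec_collect_scales_py (primary_size : Int) (multiscale : Bool) (extra_scales : List (Option Int)) (out : List Int) : Prop := out = collect_scales_py_alt primary_size multiscale extra_scales
instance (primary_size : Int) (multiscale : Bool) (extra_scales : List (Option Int)) (out : List Int) : Decidable (Spec_collect_scales_py primary_size multiscale extra_scales out) := by unfold Spec_collect_scales_py; infer_instance

-- ===== CLAIM (what is proved, stated in full; the proofs are below) =====
def Claim_equal_collect_scales_py : Prop := ∀ (primary_size : Int) (multiscale : Bool) (extra_scales : List (Option Int)), Dom_collect_scales_py primary_size multiscale extra_scales → Spec_collect_scales_py primary_size multiscale extra_scales (collect_scales_py primary_size multiscale extra_scales)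

-- ===== LEMMAS AND PROOFS =====

theorem pvFdedup_nil : pvFdedup [] = [] := by rw [pvFdedup.eq_def]

theorem pvFdedup_cons (x : Int) (rest : List Int) :
    pvFdedup (x :: rest) = x :: pvFdedup (rest.filter (fun c => c ≠ x)) := by
  rw [pvFdedup.eq_def]

-- A's loop over the Option list is the set-add fold over the non-None elements.
theorem loopA_eq_foldl_add (ys : List (Option Int)) (init : List Int) :
    ys.foldl (fun acc sc =>
        match sc with
        | none => acc
        | some s => if s ∈ acc then acc else acc ++ [s]) init
      = (ys.filterMap id).foldl PySem.Set.add init := by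
  induction ys generalizing init with
  | nil => rfl
  | cons h t ih =>
      cases h with
      | none => simpa using ih init
      | some s => simp [PySem.Set.add, PySem.Set.contains, ih]

-- The membership fold equals head-filter dedup of the part of ys not already in acc.
theorem foldl_add_eq_fdedup (ys : List Int) (acc : List Int) :
    ys.foldl PySem.Set.add acc = acc ++ pvFdedup (ys.filter (fun c => c ∉ acc)) := by
  induction ys generalizing acc with
  | nil => simp [pvFdedup_nil]
  | cons x xs ih =>
      by_cases hx : x ∈ acc
      · have h1 : PySem.Set.add acc x = acc := by
          simp [PySem.Set.add, PySem.Set.contains, hx]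
        rw [List.foldl_cons, h1, ih]
        simp [hx]
      · have hadd : PySem.Set.add acc x = acc ++ [x] := by
          simp [PySem.Set.add, PySem.Set.contains, hx]
        rw [List.foldl_cons, hadd, ih]
        simp only [List.filter_cons, hx, not_false_eq_true, decide_true, if_true,
          List.append_assoc, List.cons_append, List.nil_append]
        rw [pvFdedup_cons]
        have hf : List.filter (fun c => decide (c ∉ acc ++ [x])) xs
            = List.filter (fun c => decide (c ≠ x)) (List.filter (fun c => decide (c ∉ acc)) xs) := by
          rw [List.filter_filter]
          apply List.filter_congr
          intro c _
          by_cases h1 : c = x <;> by_cases h2 : c ∈ acc <;> simp [h1, h2]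
        rw [hf]

-- ===== VERDICT (by name: the statement is the Claim_ definition above) =====
theorem collect_scales_py_spec : Claim_equal_collect_scales_py := by
  intro p m es _
  unfold Spec_collect_scales_py collect_scales_py collect_scales_py_alt
  simp only []
  rw [loopA_eq_foldl_add, foldl_add_eq_fdedup]
  by_cases hg : (m && !es.isEmpty) = true <;>
    by_cases hp : p ≠ 0 <;>
      simp [hg, hp, pvFdedup_nil, pvFdedup_cons]
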